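-- pv_equiv track=rewrite | github.com/alexkallai/advent-of-code-2024 | day-9/solution-1.py | organized
-- ===== SOURCE A (Python) =====
-- def organized(work_list):
--     numbers_ended = False
--     for char in work_list:
--         if not char.isalnum():
--             numbers_ended = True
--         if numbers_ended:
--             if char != ".":
--                 return False
--     return True
-- ===== SOURCE B (Python) =====
-- def organized(work_list):
--     # Two-phase: strip trailing "." entries from the end, then the remaining
--     # prefix must consist entirely of alnum entries.
--     seq = list(work_list)
--     while seq and seq[-1] == ".":
--         seq.pop()
--     return all(c.isalnum() for c in seq)
-- ===== Notes on version B (the rewrite author's own statement) =====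
-- stated objective: simpler
-- what changed: Replaces A's single forward pass carrying a numbers_ended flag with a locate-split-then-validate shape: strip trailing '.' entries from the end, then check the remaining prefix is all alnum.
import Mathlib
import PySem

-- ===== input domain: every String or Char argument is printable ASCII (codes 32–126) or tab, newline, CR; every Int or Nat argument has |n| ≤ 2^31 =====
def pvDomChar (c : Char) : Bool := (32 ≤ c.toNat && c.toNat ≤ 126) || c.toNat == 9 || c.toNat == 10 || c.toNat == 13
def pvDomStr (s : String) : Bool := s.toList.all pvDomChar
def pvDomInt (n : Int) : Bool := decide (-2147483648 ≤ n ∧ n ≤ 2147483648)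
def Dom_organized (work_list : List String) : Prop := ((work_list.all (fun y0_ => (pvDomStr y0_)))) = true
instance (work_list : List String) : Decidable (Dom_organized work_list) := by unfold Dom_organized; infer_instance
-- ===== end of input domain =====

-- B strips trailing "." entries then checks the rest is all alnum (same result as A's flag-carrying pass; objective: simpler decomposition).


-- ===== PORT A =====
def organizedLoop : List String → Bool → Bool
  | [], _ => true
  | char :: rest, numbersEnded =>
    let numbersEnded' := if !(PySem.Str.strIsalnum char) then true else numbersEnded
    if numbersEnded' then
      if char != "." then false else organizedLoop rest numbersEnded'
    else organizedLoop rest numbersEnded'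

def organized (work_list : List String) : Bool := organizedLoop work_list false

-- ===== PORT B =====
def organized_alt (work_list : List String) : Bool :=
  ((work_list.reverse.dropWhile (fun s => s == ".")).all (fun s => PySem.Str.strIsalnum s))

-- ===== PRECONDITION & SPEC =====
def Spec_organized (work_list : List String) (out : Bool) : Prop := out = organized_alt work_list
instance (work_list : List String) (out : Bool) : Decidable (Spec_organized work_list out) := by unfold Spec_organized; infer_instance

-- ===== CLAIM (what is proved, stated in full; the proofs are below) =====
def Claim_equal_organized : Prop := ∀ (work_list : List String), Dom_organized work_list → Spec_organized work_list (organized work_list)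

-- ===== LEMMAS AND PROOFS =====

-- once the flag is set, A just checks every remaining entry is "."
theorem organizedLoop_true (wl : List String) :
    organizedLoop wl true = wl.all (fun s => s == ".") := by
  induction wl with
  | nil => rfl
  | cons c rest ih =>
    simp only [organizedLoop, List.all_cons]
    by_cases h : c = "."
    · subst h
      simp [ih, PySem.Str.strIsalnum]
    · have hne : (c != ".") = true := by simpa using h
      simp [hne, h]

theorem dot_not_alnum : PySem.Chars.strIsalnum ['.'] = false := by decide

theorem organizedLoop_false (wl : List String) :
    organizedLoop wl false = organized_alt wl := by
  induction wl with
  | nil => rfl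
  | cons c rest ih =>
    unfold organized_alt at *
    rw [List.reverse_cons, List.dropWhile_append]
    by_cases hE : rest.reverse.dropWhile (fun s => s == ".") = []
    · -- every entry of rest is "."
      have hall : rest.all (fun s => s == ".") = true := by
        rw [List.all_eq_true]
        intro x hx
        exact List.dropWhile_eq_nil_iff.mp hE x (by simpa using hx)
      rw [hE]
      by_cases hc : c = "."
      · subst hc
        simp [organizedLoop, organizedLoop_true, hall, List.dropWhile, dot_not_alnum]
      · have hcd : (c == ".") = false := by simpa using hc
        have hne : (c != ".") = true := by simpa using hc
        by_cases ha : PySem.Str.strIsalnum c = true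
        · have ha2 : PySem.Chars.strIsalnum c.toList = true := by simpa using ha
          simp [organizedLoop, ha2, List.dropWhile, hcd, ih, hE]
        · have ha2 : PySem.Chars.strIsalnum c.toList = false := by
            simpa [PySem.Str.strIsalnum] using ha
          simp [organizedLoop, ha2, hne, List.dropWhile, hcd]
    · -- dropWhile of rest.reverse is nonempty: its head y is not "." and lies in rest
      obtain ⟨y, ys, hy⟩ := List.exists_cons_of_ne_nil hE
      have hynot : (y == ".") = false := by
        have h1 := List.head?_dropWhile_not (p := fun s => s == ".") (l := rest.reverse)
        rw [hy] at h1
        simpa using h1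
      have hymem : y ∈ rest := by
        have : y ∈ rest.reverse.dropWhile (fun s => s == ".") := by simp [hy]
        simpa using (List.dropWhile_sublist (l := rest.reverse)
          (p := fun s => s == ".")).subset this
      have hEfalse : (rest.reverse.dropWhile (fun s => s == ".")).isEmpty = false := by
        simp [hy]
      rw [if_neg (by simp [hEfalse])]
      rw [List.all_append]
      by_cases hc : c = "."
      · subst hc
        have hrest : rest.all (fun s => s == ".") = false := by
          rw [List.all_eq_false]
          exact ⟨y, hymem, by simpa using hynot⟩
        simp [organizedLoop, organizedLoop_true, hrest, dot_not_alnum]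
      · have hcd : (c == ".") = false := by simpa using hc
        have hne : (c != ".") = true := by simpa using hc
        by_cases ha : PySem.Str.strIsalnum c = true
        · have ha2 : PySem.Chars.strIsalnum c.toList = true := by simpa using ha
          simp [organizedLoop, ha2, ih]
        · have ha2 : PySem.Chars.strIsalnum c.toList = false := by
            simpa [PySem.Str.strIsalnum] using ha
          simp [organizedLoop, ha2, hne]

-- ===== VERDICT (by name: the statement is the Claim_ definition above) =====
theorem organized_spec : Claim_equal_organized := by
  intro wl _
  unfold Spec_organized organized
  exact organizedLoop_false wl
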